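-- pv_equiv track=rewrite | github.com/rema888/Remenny_Laby_DM | Laba_2/dm1_laba2.py | count_distinct_words
-- ===== SOURCE A (Python) =====
-- from collections import Counter
--
-- def count_distinct_words(source_word: str, k: int) -> int:
--
--     freq = Counter(source_word)
--     all_words = set()
--
--     def enumeration(current: str, freq_left: dict):
--         # Если набрали нужную длину — сохраняем
--         if len(current) == k:
--             all_words.add(current)
--             return
--
--         # Пробуем каждую букву, которая ещё доступна
--         for letter in freq_left:
--             if freq_left[letter] > 0:
--                 # Используем букву
--                 freq_left[letter] -= 1
--                 enumeration(current + letter, freq_left)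
--                 # Возвращаем обратно
--                 freq_left[letter] += 1
--
--     # Запускаем перебор
--     enumeration("", freq)
--     return len(all_words)
-- ===== SOURCE B (Python) =====
-- from collections import Counter
--
--
-- def _comb(n: int, r: int) -> int:
--     # binomial coefficient C(n, r) by the multiplicative formula
--     c = 1
--     for i in range(r):
--         c = c * (n - i) // (i + 1)
--     return c
--
--
-- def count_distinct_words(source_word: str, k: int) -> int:
--     # DP over letters: dp[j] = number of distinct length-j words using the
--     # letters processed so far; a letter with multiplicity c contributes by
--     # choosing i of the j positions for it: dp'[j] = sum C(j,i)*dp[j-i].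
--     if k < 0 or k > len(source_word):
--         return 0
--     dp = [1] + [0] * k
--     for c in Counter(source_word).values():
--         dp = [
--             sum(_comb(j, i) * dp[j - i] for i in range(min(c, j) + 1))
--             for j in range(k + 1)
--         ]
--     return dp[k]
-- ===== Notes on version B (the rewrite author's own statement) =====
-- stated objective: faster
-- what changed: Replaces the exhaustive backtracking enumeration of all feasible words with a per-letter dynamic programme convolving binomial coefficients (dp'[j] = sum C(j,i)*dp[j-i]), doing polynomial arithmetic instead of materialising every distinct word; intended as faster (a timing run measured B several hundred times faster at the largest size both versions finished, A timing out on all larger inputs).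
import Mathlib
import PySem

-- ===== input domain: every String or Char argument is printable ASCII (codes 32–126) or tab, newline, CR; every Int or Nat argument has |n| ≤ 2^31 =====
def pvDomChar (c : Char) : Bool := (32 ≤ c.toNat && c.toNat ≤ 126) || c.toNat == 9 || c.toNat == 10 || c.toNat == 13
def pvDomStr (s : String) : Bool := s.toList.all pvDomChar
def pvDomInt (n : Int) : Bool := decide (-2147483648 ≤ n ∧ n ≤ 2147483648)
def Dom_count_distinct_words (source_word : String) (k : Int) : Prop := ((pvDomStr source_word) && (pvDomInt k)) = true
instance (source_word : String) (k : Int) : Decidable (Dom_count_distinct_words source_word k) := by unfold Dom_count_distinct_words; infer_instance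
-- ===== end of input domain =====

-- B replaces A's exhaustive backtracking enumeration of every feasible word by a
-- per-letter binomial-convolution dynamic programme (intended as faster; the timing
-- run measured B several hundred times faster at the largest size both finished,
-- with A timing out on every larger input).

-- ===== PORT A =====
-- recursive enumeration; `fuel = len(source)+1` bounds the recursion depth, which is
-- at most 1 + (total remaining letter budget) — a totality guard only, never reached.
def pvEnumA (k : Int) : Nat → List Char → PySem.Dict Char Int → PySem.Set (List Char) → PySem.Set (List Char)
  | 0, _, _, acc => acc
  | fuel+1, current, freq, acc =>
    if (current.length : Int) = k then PySem.Set.add acc current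
    else
      freq.keys.foldl
        (fun a letter =>
          if 0 < freq.getD letter 0 then
            pvEnumA k fuel (current ++ [letter]) (freq.modify letter 0 (· - 1)) a
          else a)
        acc

def count_distinct_words (source_word : String) (k : Int) : Int :=
  let freq := PySem.Dict.counter source_word.toList
  let all_words := pvEnumA k (source_word.toList.length + 1) [] freq PySem.Set.empty
  (all_words.length : Int)

-- ===== PORT B =====
-- C(n, r) by the multiplicative formula, as in Source B's _comb
def pvComb (n r : Int) : Int :=
  (PySem.List.pyRange 0 r).foldl (fun c i => PySem.Int.floordiv (c * (n - i)) (i + 1)) 1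

def count_distinct_words_alt (source_word : String) (k : Int) : Int :=
  if k < 0 ∨ (source_word.toList.length : Int) < k then 0
  else
    let dp0 : List Int := 1 :: List.replicate k.toNat 0
    let dp := (PySem.Dict.counter source_word.toList).values.foldl
      (fun dp c =>
        (PySem.List.pyRange 0 (k + 1)).map (fun j =>
          ((PySem.List.pyRange 0 (min c j + 1)).map
            (fun i => pvComb j i * PySem.List.pyGetD dp (j - i) 0)).sum))
      dp0
    PySem.List.pyGetD dp k 0

-- ===== PRECONDITION & SPEC =====
def Spec_count_distinct_words (source_word : String) (k : Int) (out : Int) : Prop := out = count_distinct_words_alt source_word k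
instance (source_word : String) (k : Int) (out : Int) : Decidable (Spec_count_distinct_words source_word k out) := by unfold Spec_count_distinct_words; infer_instance

-- ===== CLAIM (what is proved, stated in full; the proofs are below) =====
def Claim_equal_count_distinct_words : Prop := ∀ (source_word : String) (k : Int), Dom_count_distinct_words source_word k → Spec_count_distinct_words source_word k (count_distinct_words source_word k)

-- ===== LEMMAS AND PROOFS =====

-- ---- generic list helpers ----
-- membership through a fold that only ever grows the accumulator
theorem pv_mem_foldl {α β : Type} (l : List α) (f : List β → α → List β) (Q : α → β → Prop)
    (hf : ∀ acc a, a ∈ l → ∀ w, w ∈ f acc a ↔ w ∈ acc ∨ Q a w) :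
    ∀ acc w, w ∈ l.foldl f acc ↔ w ∈ acc ∨ ∃ a ∈ l, Q a w := by
  induction l with
  | nil => intro acc w; simp
  | cons a l ih =>
    intro acc w
    rw [List.foldl_cons,
      ih (fun acc b hb w => hf acc b (List.mem_cons_of_mem _ hb) w) (f acc a) w,
      hf acc a (List.mem_cons_self) w]
    simp only [List.mem_cons]
    constructor
    · rintro ((h | h) | ⟨b, hb, hq⟩)
      · exact Or.inl h
      · exact Or.inr ⟨a, Or.inl rfl, h⟩
      · exact Or.inr ⟨b, Or.inr hb, hq⟩
    · rintro (h | ⟨b, (rfl | hb), hq⟩)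
      · exact Or.inl (Or.inl h)
      · exact Or.inl (Or.inr hq)
      · exact Or.inr ⟨b, hb, hq⟩

theorem pv_nodup_foldl {α β : Type} (l : List α) (f : List β → α → List β)
    (hf : ∀ acc a, a ∈ l → acc.Nodup → (f acc a).Nodup) :
    ∀ acc, acc.Nodup → (l.foldl f acc).Nodup := by
  induction l with
  | nil => intro acc h; simpa using h
  | cons a l ih =>
    intro acc h
    rw [List.foldl_cons]
    exact ih (fun acc b hb => hf acc b (List.mem_cons_of_mem _ hb))
      (f acc a) (hf acc a List.mem_cons_self h)

theorem pv_nodup_add {β : Type} [BEq β] [LawfulBEq β] (s : PySem.Set β) (x : β)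
    (h : List.Nodup s) : List.Nodup (PySem.Set.add s x) :=
  PySem.Set.nodup_add s x h

-- decrementing one entry of a nodup-indexed sum
theorem pv_sum_map_dec (l : List Char) (hnd : l.Nodup) (a : Char) (ha : a ∈ l)
    (f g : Char → Nat) (hfa : 0 < f a) (hga : g a = f a - 1)
    (hne : ∀ x ∈ l, x ≠ a → g x = f x) :
    (l.map g).sum + 1 = (l.map f).sum := by
  induction l with
  | nil => cases ha
  | cons b l ih =>
    rcases List.mem_cons.mp ha with rfl | hb
    · have : l.map g = l.map f := by
        apply List.map_congr_left
        intro x hx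
        exact hne x (List.mem_cons_of_mem _ hx)
          (fun hxa => (List.nodup_cons.mp hnd).1 (hxa ▸ hx))
      simp only [List.map_cons, List.sum_cons, this]
      omega
    · have hba : b ≠ a := fun hba => (List.nodup_cons.mp hnd).1 (hba ▸ hb)
      have := ih (List.nodup_cons.mp hnd).2 hb
        (fun x hx hxa => hne x (List.mem_cons_of_mem _ hx) hxa)
      simp only [List.map_cons, List.sum_cons, hne b List.mem_cons_self hba]
      omega

theorem pv_list_sum_range (n : Nat) (f : Nat → Nat) :
    ((List.range n).map f).sum = ∑ i ∈ Finset.range n, f i := by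
  induction n with
  | zero => simp
  | succ n ih => rw [List.range_succ, Finset.sum_range_succ]; simp [ih]

theorem pv_sum_swap {α : Type} (l : List α) (n : Nat) (f : Nat → α → Nat) :
    (l.map (fun p => ∑ i ∈ Finset.range n, f i p)).sum
      = ∑ i ∈ Finset.range n, (l.map (f i)).sum := by
  induction l with
  | nil => simp
  | cons p l ih => simp [ih, Finset.sum_add_distrib]

-- ---- the common specification: feasible words and their count ----
-- budget lookup in an association list of letter budgets
def pvLk (items : List (Char × Nat)) (c : Char) : Nat :=
  ((items.find? (fun p => p.1 == c)).map (·.2)).getD 0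

-- decrement the budget of letter a
def pvDec (items : List (Char × Nat)) (a : Char) : List (Char × Nat) :=
  items.map (fun p => if p.1 = a then (p.1, p.2 - 1) else p)

-- all feasible words of length j, each exactly once (first letter chosen first)
def pvWordsFP : Nat → List (Char × Nat) → List (List Char)
  | 0, _ => [[]]
  | j+1, items =>
      (items.filter (fun p => 0 < p.2)).flatMap
        (fun p => (pvWordsFP j (pvDec items p.1)).map (fun u => p.1 :: u))

-- the binomial-convolution count (B's DP, letters consumed head first)
def pvF : List (Char × Nat) → Nat → Nat
  | [], 0 => 1
  | [], _+1 => 0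
  | p :: rest, j =>
      ((List.range (min p.2 j + 1)).map (fun i => j.choose i * pvF rest (j - i))).sum

-- ---- pvDec / pvLk facts ----
theorem pvDec_keys (items : List (Char × Nat)) (a : Char) :
    (pvDec items a).map Prod.fst = items.map Prod.fst := by
  simp only [pvDec, List.map_map]
  apply List.map_congr_left
  intro p _
  by_cases h : p.1 = a <;> simp [h]

theorem pvDec_of_not_mem (items : List (Char × Nat)) (a : Char)
    (h : a ∉ items.map Prod.fst) : pvDec items a = items := by
  have hid : ∀ p ∈ items, (if p.1 = a then (p.1, p.2 - 1) else p) = p := by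
    intro p hp
    have : p.1 ≠ a := fun hpa => h (hpa ▸ List.mem_map_of_mem hp)
    simp [this]
  simp only [pvDec]
  rw [List.map_congr_left hid]
  simp

theorem pvLk_nil (c : Char) : pvLk [] c = 0 := rfl

theorem pvLk_cons (p : Char × Nat) (rest : List (Char × Nat)) (c : Char) :
    pvLk (p :: rest) c = if p.1 = c then p.2 else pvLk rest c := by
  by_cases h : p.1 = c <;> simp [pvLk, List.find?_cons, h]

theorem pvDec_cons (p : Char × Nat) (rest : List (Char × Nat)) (a : Char) :
    pvDec (p :: rest) a = (if p.1 = a then (p.1, p.2 - 1) else p) :: pvDec rest a := rfl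

theorem pvLk_dec (items : List (Char × Nat)) (a c : Char)
    (hnd : (items.map Prod.fst).Nodup) :
    pvLk (pvDec items a) c = if c = a then pvLk items a - 1 else pvLk items c := by
  induction items with
  | nil => simp [pvLk_nil, pvDec]
  | cons p rest ih =>
    have hnd' : (rest.map Prod.fst).Nodup := (List.nodup_cons.mp hnd).2
    have hp1 : p.1 ∉ rest.map Prod.fst := (List.nodup_cons.mp hnd).1
    rw [pvDec_cons]
    by_cases hpa : p.1 = a
    · have hdec : pvDec rest a = rest := pvDec_of_not_mem rest a (hpa ▸ hp1)
      by_cases hca : c = a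
      · have hpc : p.1 = c := by rw [hpa, hca]
        simp [hpa, hca, hpc, pvLk_cons, hdec]
      · have hpc : ¬ p.1 = c := fun h => hca (h ▸ hpa)
        have hac : ¬ a = c := fun h => hca h.symm
        simp [hpa, hca, hpc, hac, pvLk_cons, hdec]
    · by_cases hpc : p.1 = c
      · have hca : ¬ c = a := fun h => hpa (hpc.trans h)
        simp [hpa, hca, hpc, pvLk_cons]
      · by_cases hca : c = a
        · subst hca
          simp [hpa, hpc, pvLk_cons, ih hnd']
        · simp [hpa, hca, hpc, pvLk_cons, ih hnd']

theorem pvLk_mem (items : List (Char × Nat)) (p : Char × Nat)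
    (hnd : (items.map Prod.fst).Nodup) (hp : p ∈ items) : pvLk items p.1 = p.2 := by
  induction items with
  | nil => cases hp
  | cons q rest ih =>
    rcases List.mem_cons.mp hp with rfl | hp'
    · simp [pvLk_cons]
    · have hq : q.1 ≠ p.1 := by
        intro h
        exact (List.nodup_cons.mp hnd).1 (h ▸ List.mem_map_of_mem hp')
      rw [pvLk_cons, if_neg hq]
      exact ih (List.nodup_cons.mp hnd).2 hp'

theorem pvLk_pos (items : List (Char × Nat)) (a : Char) (h : 0 < pvLk items a) :
    (a, pvLk items a) ∈ items := by
  cases hf : items.find? (fun p => p.1 == a) with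
  | none => simp [pvLk, hf] at h
  | some q =>
    have hmem : q ∈ items := List.mem_of_find?_eq_some hf
    have hqa : q.1 = a := by simpa using List.find?_some hf
    have hv : pvLk items a = q.2 := by simp [pvLk, hf]
    rw [hv, ← hqa]
    simpa using hmem

theorem pvLk_map (l : List Char) (g : Char → Nat) (c : Char) :
    pvLk (l.map (fun a => (a, g a))) c = if c ∈ l then g c else 0 := by
  induction l with
  | nil => simp [pvLk_nil]
  | cons b l ih =>
    rw [List.map_cons, pvLk_cons, ih]
    by_cases hbc : b = c
    · simp [hbc]
    · simp [hbc, Ne.symm hbc]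

-- ---- pvF facts ----
theorem pvF_base (items : List (Char × Nat)) : pvF items 0 = 1 := by
  induction items with
  | nil => rfl
  | cons p rest ih => simp [pvF, ih]

-- indicator form over the full range
theorem pvF_eq_ite (p : Char × Nat) (rest : List (Char × Nat)) (j : Nat) :
    pvF (p :: rest) j
      = ∑ i ∈ Finset.range (j + 1), if i ≤ p.2 then j.choose i * pvF rest (j - i) else 0 := by
  rw [show pvF (p :: rest) j
      = ((List.range (min p.2 j + 1)).map (fun i => j.choose i * pvF rest (j - i))).sum from rfl,
    pv_list_sum_range, ← Finset.sum_filter]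
  apply Finset.sum_congr _ (fun _ _ => rfl)
  ext i
  simp only [Finset.mem_range, Finset.mem_filter]
  omega

-- the first-letter recurrence (Pascal); the heart of the equivalence
theorem pvF_step (items : List (Char × Nat)) (hnd : (items.map Prod.fst).Nodup) (j : Nat) :
    pvF items (j + 1)
      = ((items.filter (fun p => 0 < p.2)).map (fun p => pvF (pvDec items p.1) j)).sum := by
  induction items generalizing j with
  | nil => simp [pvF]
  | cons p rest ih =>
    have hnd' : (rest.map Prod.fst).Nodup := (List.nodup_cons.mp hnd).2
    have hp1 : p.1 ∉ rest.map Prod.fst := (List.nodup_cons.mp hnd).1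
    have hdecp : pvDec (p :: rest) p.1 = (p.1, p.2 - 1) :: rest := by
      rw [pvDec_cons, if_pos rfl, pvDec_of_not_mem rest p.1 hp1]
    have hdecq : ∀ q ∈ rest.filter (fun p => 0 < p.2),
        pvDec (p :: rest) q.1 = p :: pvDec rest q.1 := by
      intro q hq
      have hq' : q ∈ rest := List.mem_of_mem_filter hq
      have : ¬ p.1 = q.1 := fun h => hp1 (h ▸ List.mem_map_of_mem hq')
      rw [pvDec_cons, if_neg this]
    rw [pvF_eq_ite, Finset.sum_range_succ']
    have hsplit : ∀ i, (if i + 1 ≤ p.2 then (j + 1).choose (i + 1) * pvF rest (j + 1 - (i + 1)) else 0)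
        = (if i + 1 ≤ p.2 then j.choose i * pvF rest (j - i) else 0)
          + (if i + 1 ≤ p.2 then j.choose (i + 1) * pvF rest (j - i) else 0) := by
      intro i
      rw [Nat.choose_succ_succ, Nat.succ_sub_succ, add_mul]
      split <;> simp
    simp only [hsplit, Finset.sum_add_distrib]
    have hzero : (if (0 : ℕ) ≤ p.2 then (j + 1).choose 0 * pvF rest (j + 1 - 0) else 0)
        = pvF rest (j + 1) := by simp
    rw [hzero]
    have hhead : (∑ i ∈ Finset.range (j + 1), if i + 1 ≤ p.2 then j.choose i * pvF rest (j - i) else 0)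
        = (if 0 < p.2 then pvF ((p.1, p.2 - 1) :: rest) j else 0) := by
      by_cases hc : 0 < p.2
      · rw [if_pos hc, pvF_eq_ite]
        exact Finset.sum_congr rfl (fun i _ => if_congr (by simp; omega) rfl rfl)
      · rw [if_neg hc]
        exact Finset.sum_eq_zero (fun i _ => if_neg (by omega))
    have htail : (∑ i ∈ Finset.range (j + 1), if i + 1 ≤ p.2 then j.choose (i + 1) * pvF rest (j - i) else 0)
          + pvF rest (j + 1)
        = ((rest.filter (fun p => 0 < p.2)).map (fun q => pvF (p :: pvDec rest q.1) j)).sum := by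
      have hback : (∑ i ∈ Finset.range (j + 1), if i + 1 ≤ p.2 then j.choose (i + 1) * pvF rest (j - i) else 0)
            + pvF rest (j + 1)
          = ∑ i ∈ Finset.range (j + 2), if i ≤ p.2 then j.choose i * pvF rest (j + 1 - i) else 0 := by
        rw [Finset.sum_range_succ' (fun i => if i ≤ p.2 then j.choose i * pvF rest (j + 1 - i) else 0) (j + 1)]
        congr 1
        · exact Finset.sum_congr rfl (fun i _ => if_congr (by omega) (by rw [Nat.succ_sub_succ]) rfl)
        · simp
      rw [hback, Finset.sum_range_succ]
      have hlast : (if j + 1 ≤ p.2 then j.choose (j + 1) * pvF rest (j + 1 - (j + 1)) else 0) = 0 := by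
        split <;> simp [Nat.choose_succ_self]
      rw [hlast, add_zero]
      have hterm : ∀ i ∈ Finset.range (j + 1),
          (if i ≤ p.2 then j.choose i * pvF rest (j + 1 - i) else 0)
            = ((rest.filter (fun p => 0 < p.2)).map
                (fun q => if i ≤ p.2 then j.choose i * pvF (pvDec rest q.1) (j - i) else 0)).sum := by
        intro i hi
        have hij : i ≤ j := Nat.lt_succ_iff.mp (Finset.mem_range.mp hi)
        have : j + 1 - i = (j - i) + 1 := by omega
        rw [this, ih hnd' (j - i)]
        split
        · exact (List.sum_map_mul_left _ _ _).symm
        · simp [List.map_const]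
      rw [Finset.sum_congr rfl hterm, ← pv_sum_swap]
      congr 1
      apply List.map_congr_left
      intro q _
      rw [pvF_eq_ite]
    by_cases hc : 0 < p.2
    · rw [List.filter_cons_of_pos (by simpa using hc), List.map_cons, List.sum_cons, hdecp,
        List.map_congr_left (fun q hq => show pvF (pvDec (p :: rest) q.1) j
          = pvF (p :: pvDec rest q.1) j by rw [hdecq q hq]),
        add_assoc, htail, hhead, if_pos hc]
    · rw [List.filter_cons_of_neg (by simpa using hc),
        List.map_congr_left (fun q hq => show pvF (pvDec (p :: rest) q.1) j
          = pvF (p :: pvDec rest q.1) j by rw [hdecq q hq]),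
        add_assoc, htail, hhead, if_neg hc, zero_add]

theorem pvF_zero_of_lt (items : List (Char × Nat)) (j : Nat)
    (h : (items.map Prod.snd).sum < j) : pvF items j = 0 := by
  induction items generalizing j with
  | nil =>
    cases j with
    | zero => simp at h
    | succ j => rfl
  | cons p rest ih =>
    rw [show pvF (p :: rest) j
        = ((List.range (min p.2 j + 1)).map (fun i => j.choose i * pvF rest (j - i))).sum from rfl]
    apply List.sum_eq_zero
    intro x hx
    rcases List.mem_map.mp hx with ⟨i, hi, rfl⟩
    have hi' : i < min p.2 j + 1 := List.mem_range.mp hi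
    simp only [List.map_cons, List.sum_cons] at h
    rw [ih (j - i) (by omega)]
    simp

-- ---- pvWordsFP facts ----
theorem pv_words_mem (j : Nat) :
    ∀ (items : List (Char × Nat)), (items.map Prod.fst).Nodup →
      ∀ w : List Char, w ∈ pvWordsFP j items ↔ w.length = j ∧ ∀ c, w.count c ≤ pvLk items c := by
  induction j with
  | zero =>
    intro items hnd w
    constructor
    · intro hw
      have : w = [] := by simpa [pvWordsFP] using hw
      simp [this]
    · intro ⟨hlen, _⟩
      have : w = [] := List.length_eq_zero_iff.mp hlen
      simp [this, pvWordsFP]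
  | succ j ih =>
    intro items hnd w
    simp only [pvWordsFP, List.mem_flatMap, List.mem_map, List.mem_filter]
    constructor
    · rintro ⟨p, hp, u, hu, rfl⟩
      have hpm : p ∈ items := hp.1
      have hppos : 0 < p.2 := by simpa using hp.2
      have hlk : pvLk items p.1 = p.2 := pvLk_mem items p hnd hpm
      have hu' := (ih (pvDec items p.1) (by rw [pvDec_keys]; exact hnd) u).mp hu
      refine ⟨by simp [hu'.1], fun c => ?_⟩
      have hc := hu'.2 c
      rw [pvLk_dec items p.1 c hnd] at hc
      by_cases hcp : c = p.1
      · subst hcp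
        simp only [List.count_cons_self]
        simp at hc
        omega
      · rw [if_neg hcp] at hc
        have hcp' : ¬ p.1 = c := fun h => hcp h.symm
        simpa [List.count_cons, hcp'] using hc
    · rintro ⟨hlen, hcnt⟩
      cases w with
      | nil => simp at hlen
      | cons a u =>
        have hca := hcnt a
        rw [List.count_cons_self] at hca
        have h1 : 0 < pvLk items a := by omega
        have hpm := pvLk_pos items a h1
        refine ⟨(a, pvLk items a), ⟨hpm, by simpa using h1⟩, u, ?_, rfl⟩
        apply (ih (pvDec items a) (by rw [pvDec_keys]; exact hnd) u).mpr
        refine ⟨by simpa using hlen, fun c => ?_⟩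
        rw [pvLk_dec items a c hnd]
        by_cases hcp : c = a
        · subst hcp
          rw [if_pos rfl]
          omega
        · rw [if_neg hcp]
          have := hcnt c
          have hcp' : ¬ a = c := fun h => hcp h.symm
          simpa [List.count_cons, hcp'] using this

theorem pv_words_nodup (j : Nat) :
    ∀ (items : List (Char × Nat)), (items.map Prod.fst).Nodup →
      (pvWordsFP j items).Nodup := by
  induction j with
  | zero => intro items _; simp [pvWordsFP]
  | succ j ih =>
    intro items hnd
    rw [show pvWordsFP (j + 1) items = (items.filter (fun p => 0 < p.2)).flatMap
        (fun p => (pvWordsFP j (pvDec items p.1)).map (fun u => p.1 :: u)) from rfl]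
    rw [List.nodup_flatMap]
    constructor
    · intro p _
      exact (ih (pvDec items p.1) (by rw [pvDec_keys]; exact hnd)).map
        (fun u u' h => by injection h)
    · have hfk : ((items.filter (fun p => 0 < p.2)).map Prod.fst).Nodup :=
        hnd.sublist (List.Sublist.map Prod.fst List.filter_sublist)
      have hpw : (items.filter (fun p => 0 < p.2)).Pairwise (fun p q => p.1 ≠ q.1) :=
        List.pairwise_map.mp hfk
      apply hpw.imp
      intro p q hpq
      intro w hw1 hw2
      rcases List.mem_map.mp hw1 with ⟨u, _, rfl⟩
      rcases List.mem_map.mp hw2 with ⟨u', _, heq⟩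
      exact hpq (by injection heq with h1 h2; exact h1.symm)

theorem pv_words_len (j : Nat) :
    ∀ (items : List (Char × Nat)), (items.map Prod.fst).Nodup →
      (pvWordsFP j items).length = pvF items j := by
  induction j with
  | zero => intro items _; simp [pvWordsFP, pvF_base]
  | succ j ih =>
    intro items hnd
    rw [show pvWordsFP (j + 1) items = (items.filter (fun p => 0 < p.2)).flatMap
        (fun p => (pvWordsFP j (pvDec items p.1)).map (fun u => p.1 :: u)) from rfl]
    rw [List.length_flatMap, pvF_step items hnd j]
    congr 1
    apply List.map_congr_left
    intro p _
    rw [List.length_map]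
    exact ih (pvDec items p.1) (by rw [pvDec_keys]; exact hnd)

-- two budget lists with the same lookup have the same word count
theorem pv_len_congr (j : Nat) (items items' : List (Char × Nat))
    (h1 : (items.map Prod.fst).Nodup) (h2 : (items'.map Prod.fst).Nodup)
    (hlk : ∀ c, pvLk items c = pvLk items' c) :
    (pvWordsFP j items).length = (pvWordsFP j items').length := by
  apply List.Perm.length_eq
  apply (List.perm_ext_iff_of_nodup (pv_words_nodup j items h1) (pv_words_nodup j items' h2)).mpr
  intro w
  rw [pv_words_mem j items h1 w, pv_words_mem j items' h2 w]
  simp only [hlk]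

-- ---- A-side: the enumeration reaches exactly the feasible words ----
def pvGood (freq : PySem.Dict Char Int) : Prop :=
  freq.keys.Nodup ∧ ∀ c, 0 ≤ freq.getD c 0

def pvTot (freq : PySem.Dict Char Int) : Nat :=
  (freq.keys.map (fun c => (freq.getD c 0).toNat)).sum

theorem pv_enum_mem (k : Int) :
    ∀ (fuel : Nat) (current : List Char) (freq : PySem.Dict Char Int)
      (acc : PySem.Set (List Char)), pvGood freq → pvTot freq < fuel →
      ∀ w, w ∈ pvEnumA k fuel current freq acc ↔
        w ∈ acc ∨ ∃ t : List Char, w = current ++ t ∧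
          ((current.length : Int) + t.length = k) ∧
          (∀ c, (t.count c : Int) ≤ freq.getD c 0) := by
  intro fuel
  induction fuel with
  | zero => intro current freq acc _ htot; omega
  | succ fuel ih =>
    intro current freq acc hgood htot w
    rw [show pvEnumA k (fuel + 1) current freq acc
        = if (current.length : Int) = k then PySem.Set.add acc current
          else freq.keys.foldl
            (fun a letter =>
              if 0 < freq.getD letter 0 then
                pvEnumA k fuel (current ++ [letter]) (freq.modify letter 0 (· - 1)) a
              else a) acc from rfl]
    by_cases heq : (current.length : Int) = k
    · rw [if_pos heq, PySem.Set.mem_add]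
      constructor
      · rintro (h | rfl)
        · exact Or.inl h
        · exact Or.inr ⟨[], by simp, by simpa using heq, fun c => by simpa using hgood.2 c⟩
      · rintro (h | ⟨t, rfl, hlen, _⟩)
        · exact Or.inl h
        · have : t = [] := by
            have : (t.length : Int) = 0 := by omega
            exact List.length_eq_zero_iff.mp (by exact_mod_cast this)
          subst this
          simp
    · rw [if_neg heq]
      rw [pv_mem_foldl freq.keys _
        (fun a w => 0 < freq.getD a 0 ∧ ∃ t : List Char, w = (current ++ [a]) ++ t ∧
          (((current ++ [a]).length : Int) + t.length = k) ∧
          (∀ c, (t.count c : Int) ≤ (freq.modify a 0 (· - 1)).getD c 0)) ?_ acc w]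
      · constructor
        · rintro (h | ⟨a, ha, hpos, t, rfl, hlen, hcnt⟩)
          · exact Or.inl h
          · refine Or.inr ⟨a :: t, by simp, ?_, fun c => ?_⟩
            · simp only [List.length_append, List.length_cons, List.length_nil] at hlen ⊢
              push_cast at hlen ⊢
              omega
            · have hc := hcnt c
              rw [PySem.Dict.getD_modify] at hc
              by_cases hca : c = a
              · subst hca
                rw [if_pos rfl] at hc
                rw [List.count_cons_self]
                push_cast at hc ⊢
                omega
              · have hca' : ¬ a = c := fun h => hca h.symm
                rw [if_neg hca] at hc
                simpa [List.count_cons, hca'] using hc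
        · rintro (h | ⟨t, rfl, hlen, hcnt⟩)
          · exact Or.inl h
          · cases t with
            | nil => exact absurd (by simpa using hlen) heq
            | cons a t =>
              have hca := hcnt a
              rw [List.count_cons_self] at hca
              have hpos : 0 < freq.getD a 0 := by push_cast at hca; omega
              have hmem : a ∈ freq.keys := by
                by_cases hc : freq.contains a
                · exact (PySem.Dict.contains_iff_mem_keys freq a).mp hc
                · rw [PySem.Dict.getD_of_not_contains freq 0 (by simpa using hc)] at hpos
                  omega
              refine Or.inr ⟨a, hmem, hpos, t, by simp, ?_, fun c => ?_⟩
              · simp only [List.length_append, List.length_cons, List.length_nil] at hlen ⊢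
                push_cast at hlen ⊢
                omega
              · rw [PySem.Dict.getD_modify]
                by_cases hca : c = a
                · subst hca
                  rw [if_pos rfl]
                  push_cast at hca ⊢
                  omega
                · rw [if_neg hca]
                  have := hcnt c
                  have hca' : ¬ a = c := fun h => hca h.symm
                  simpa [List.count_cons, hca'] using this
      · -- the fold hypothesis: each branch is characterised by the inner call
        intro acc' a ha w'
        by_cases hpos : 0 < freq.getD a 0
        · rw [if_pos hpos]
          have hcont : freq.contains a = true := (PySem.Dict.contains_iff_mem_keys freq a).mpr ha
          have hkeys : (freq.modify a 0 (· - 1)).keys = freq.keys := by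
            rw [PySem.Dict.keys_modify, PySem.Dict.keys_insert_of_contains _ _ hcont]
          have hgood' : pvGood (freq.modify a 0 (· - 1)) := by
            refine ⟨hkeys ▸ hgood.1, fun c => ?_⟩
            rw [PySem.Dict.getD_modify]
            by_cases hca : c = a
            · rw [if_pos hca]; omega
            · rw [if_neg hca]; exact hgood.2 c
          have htot' : pvTot (freq.modify a 0 (· - 1)) < fuel := by
            have hdec : pvTot (freq.modify a 0 (· - 1)) + 1 = pvTot freq := by
              unfold pvTot
              rw [hkeys]
              apply pv_sum_map_dec freq.keys hgood.1 a ha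
                (fun c => (freq.getD c 0).toNat)
                (fun c => ((freq.modify a 0 (· - 1)).getD c 0).toNat)
              · omega
              · rw [PySem.Dict.getD_modify, if_pos rfl]; omega
              · intro x _ hx
                rw [PySem.Dict.getD_modify, if_neg hx]
            omega
          rw [ih (current ++ [a]) (freq.modify a 0 (· - 1)) acc' hgood' htot' w']
          simp only [hpos, true_and]
        · rw [if_neg hpos]
          constructor
          · exact Or.inl
          · rintro (h | ⟨h, _⟩)
            · exact h
            · exact absurd h hpos

theorem pv_enum_nodup (k : Int) :
    ∀ (fuel : Nat) (current : List Char) (freq : PySem.Dict Char Int)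
      (acc : PySem.Set (List Char)), acc.Nodup →
      (pvEnumA k fuel current freq acc).Nodup := by
  intro fuel
  induction fuel with
  | zero => intro current freq acc h; exact h
  | succ fuel ih =>
    intro current freq acc h
    rw [show pvEnumA k (fuel + 1) current freq acc
        = if (current.length : Int) = k then PySem.Set.add acc current
          else freq.keys.foldl
            (fun a letter =>
              if 0 < freq.getD letter 0 then
                pvEnumA k fuel (current ++ [letter]) (freq.modify letter 0 (· - 1)) a
              else a) acc from rfl]
    by_cases heq : (current.length : Int) = k
    · rw [if_pos heq]
      exact pv_nodup_add acc current h
    · rw [if_neg heq]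
      apply pv_nodup_foldl
      · intro acc' a _ h'
        by_cases hpos : 0 < freq.getD a 0
        · rw [if_pos hpos]
          exact ih (current ++ [a]) (freq.modify a 0 (· - 1)) acc' h'
        · rwa [if_neg hpos]
      · exact h

-- ---- tie A to the spec count ----
-- the distinct letters of s with their multiplicities
def pvItems (s : List Char) : List (Char × Nat) :=
  (PySem.Set.ofList s).map (fun a => (a, s.count a))

theorem pv_items_keys_nodup (s : List Char) : ((pvItems s).map Prod.fst).Nodup := by
  have hmap : (pvItems s).map Prod.fst = PySem.Set.ofList s := by
    simp [pvItems, List.map_map, Function.comp_def]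
  rw [hmap]
  exact PySem.Set.nodup_ofList s

theorem pv_items_sum (s : List Char) : ((pvItems s).map Prod.snd).sum = s.length := by
  have hperm : (PySem.Set.ofList s).Perm s.dedup := by
    apply (List.perm_ext_iff_of_nodup (PySem.Set.nodup_ofList s) s.nodup_dedup).mpr
    intro a
    rw [PySem.Set.mem_ofList, List.mem_dedup]
  have h1 : ((pvItems s).map Prod.snd) = (PySem.Set.ofList s).map (fun a => s.count a) := by
    simp [pvItems, List.map_map, Function.comp]
  rw [h1, List.Perm.sum_eq (hperm.map (fun a => s.count a))]
  exact List.sum_map_count_dedup_eq_length s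

theorem pv_lk_items (s : List Char) (c : Char) : pvLk (pvItems s) c = s.count c := by
  rw [show pvItems s = (PySem.Set.ofList s).map (fun a => (a, s.count a)) from rfl, pvLk_map]
  split
  · rfl
  · next h => exact (List.count_eq_zero.mpr (fun hc => h ((PySem.Set.mem_ofList s c).mpr hc))).symm

theorem pv_lk_items_rev (s : List Char) (c : Char) :
    pvLk ((pvItems s).reverse) c = s.count c := by
  rw [show (pvItems s).reverse = ((PySem.Set.ofList s).map (fun a => (a, s.count a))).reverse from rfl,
    ← List.map_reverse, pvLk_map]
  split
  · rfl
  · next h =>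
    exact (List.count_eq_zero.mpr
      (fun hc => h (List.mem_reverse.mpr ((PySem.Set.mem_ofList s c).mpr hc)))).symm

theorem pv_items_rev_keys_nodup (s : List Char) :
    (((pvItems s).reverse).map Prod.fst).Nodup := by
  rw [List.map_reverse]
  exact List.nodup_reverse.mpr (pv_items_keys_nodup s)

theorem pv_tot_counter (s : List Char) : pvTot (PySem.Dict.counter s) = s.length := by
  unfold pvTot
  rw [PySem.Dict.keys_counter]
  have hc : ∀ c ∈ PySem.Set.ofList s, ((PySem.Dict.counter s).getD c 0).toNat = s.count c := by
    intro c _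
    rw [PySem.Dict.getD_counter]
    exact Int.toNat_natCast _
  rw [List.map_congr_left hc]
  have h1 : (PySem.Set.ofList s).map (fun c => s.count c) = (pvItems s).map Prod.snd := by
    simp [pvItems, List.map_map, Function.comp_def]
  rw [h1, pv_items_sum]

theorem pv_good_counter (s : List Char) : pvGood (PySem.Dict.counter s) := by
  refine ⟨PySem.Dict.nodup_keys_counter s, fun c => ?_⟩
  rw [PySem.Dict.getD_counter]
  exact Int.natCast_nonneg _

theorem pv_A_eq (s : List Char) (k : Int) (hk : 0 ≤ k) :
    (pvEnumA k (s.length + 1) [] (PySem.Dict.counter s) PySem.Set.empty).length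
      = pvF (pvItems s) k.toNat := by
  have hmem := pv_enum_mem k (s.length + 1) [] (PySem.Dict.counter s) PySem.Set.empty
    (pv_good_counter s) (by rw [pv_tot_counter]; omega)
  have hnd := pv_enum_nodup k (s.length + 1) [] (PySem.Dict.counter s) PySem.Set.empty
    List.nodup_nil
  have hwnd := pv_words_nodup k.toNat (pvItems s) (pv_items_keys_nodup s)
  have hperm : (pvEnumA k (s.length + 1) [] (PySem.Dict.counter s) PySem.Set.empty).Perm
      (pvWordsFP k.toNat (pvItems s)) := by
    apply (List.perm_ext_iff_of_nodup hnd hwnd).mpr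
    intro w
    rw [hmem w, pv_words_mem k.toNat (pvItems s) (pv_items_keys_nodup s) w]
    constructor
    · rintro (h | ⟨t, rfl, hlen, hcnt⟩)
      · exact absurd h (List.not_mem_nil)
      · refine ⟨?_, fun c => ?_⟩
        · simp only [List.length_nil] at hlen
          omega
        · have hc := hcnt c
          rw [PySem.Dict.getD_counter] at hc
          rw [pv_lk_items]
          exact_mod_cast hc
    · rintro ⟨hlen, hcnt⟩
      refine Or.inr ⟨w, by simp, ?_, fun c => ?_⟩
      · have hwk : (w.length : Int) = k := by omega
        simpa using hwk
      · rw [PySem.Dict.getD_counter]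
        have := hcnt c
        rw [pv_lk_items] at this
        exact_mod_cast this
  rw [hperm.length_eq, pv_words_len k.toNat _ (pv_items_keys_nodup s)]

theorem pv_A_neg (s : List Char) (k : Int) (hk : k < 0) :
    (pvEnumA k (s.length + 1) [] (PySem.Dict.counter s) PySem.Set.empty).length = 0 := by
  have hmem := pv_enum_mem k (s.length + 1) [] (PySem.Dict.counter s) PySem.Set.empty
    (pv_good_counter s) (by rw [pv_tot_counter]; omega)
  rw [List.length_eq_zero_iff]
  apply List.eq_nil_iff_forall_not_mem.mpr
  intro w hw
  rcases (hmem w).mp hw with h | ⟨t, _, hlen, _⟩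
  · exact List.not_mem_nil h
  · simp only [List.length_nil] at hlen
    omega

-- ---- B-side: the DP fold computes pvF ----
theorem pv_cast_sum (l : List Nat) (f : Nat → Nat) :
    (l.map (fun x => ((f x : Nat) : Int))).sum = ((l.map f).sum : Int) := by
  induction l with
  | nil => simp
  | cons x l ih => simp [ih]

theorem pv_comb_eq (n i : Nat) (h : i ≤ n) :
    pvComb (n : Int) (i : Int) = (n.choose i : Int) := by
  unfold pvComb
  rw [PySem.List.pyRange_zero_natCast, List.foldl_map]
  induction i with
  | zero => simp
  | succ i ih =>
    have hin : i ≤ n := by omega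
    rw [List.range_succ, List.foldl_append, ih hin, List.foldl_cons, List.foldl_nil]
    have hsub : ((n : Int) - (i : Nat)) = ((n - i : Nat) : Int) := by
      push_cast [Nat.cast_sub hin]
      ring
    have hmul : ((n.choose i : Nat) : Int) * ((n : Int) - (i : Nat))
        = ((n.choose (i + 1) : Nat) : Int) * ((i : Nat) + 1) := by
      rw [hsub]
      exact_mod_cast (Nat.choose_succ_right_eq n i).symm
    rw [hmul, PySem.Int.floordiv_eq_ediv_of_pos (by positivity),
      Int.mul_ediv_cancel _ (by positivity)]

theorem pv_dp_fold (k : Nat) (l : List (Char × Nat)) :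
    ∀ r : List (Char × Nat),
      l.foldl
        (fun dp c =>
          (PySem.List.pyRange 0 ((k : Int) + 1)).map (fun j =>
            ((PySem.List.pyRange 0 (min (c.2 : Int) j + 1)).map
              (fun i => pvComb j i * PySem.List.pyGetD dp (j - i) 0)).sum))
        ((List.range (k + 1)).map (fun j => (pvF r j : Int)))
      = (List.range (k + 1)).map (fun j => (pvF (l.reverse ++ r) j : Int)) := by
  induction l with
  | nil => intro r; simp
  | cons x l ih =>
    intro r
    rw [List.foldl_cons]
    have hstep : (PySem.List.pyRange 0 ((k : Int) + 1)).map (fun j =>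
          ((PySem.List.pyRange 0 (min (x.2 : Int) j + 1)).map
            (fun i => pvComb j i * PySem.List.pyGetD
              ((List.range (k + 1)).map (fun j => (pvF r j : Int))) (j - i) 0)).sum)
        = (List.range (k + 1)).map (fun j => (pvF (x :: r) j : Int)) := by
      have hkc : ((k : Int) + 1) = ((k + 1 : Nat) : Int) := by push_cast; ring
      rw [hkc, PySem.List.pyRange_zero_natCast, List.map_map]
      apply List.map_congr_left
      intro jn hjn
      have hjk : jn ≤ k := by
        have := List.mem_range.mp hjn
        omega
      show ((PySem.List.pyRange 0 (min ((x.2 : Nat) : Int) ((jn : Nat) : Int) + 1)).map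
          (fun i => pvComb (jn : Nat) i * PySem.List.pyGetD
            ((List.range (k + 1)).map (fun j => (pvF r j : Int))) ((jn : Nat) - i) 0)).sum
        = (pvF (x :: r) jn : Int)
      have hmin : min ((x.2 : Nat) : Int) ((jn : Nat) : Int) + 1
          = ((min x.2 jn + 1 : Nat) : Int) := by
        push_cast
        ring
      rw [hmin, PySem.List.pyRange_zero_natCast, List.map_map]
      have hterm : ∀ i ∈ List.range (min x.2 jn + 1),
          ((fun i => pvComb (jn : Nat) i * PySem.List.pyGetD
              ((List.range (k + 1)).map (fun j => (pvF r j : Int))) ((jn : Nat) - i) 0)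
            ∘ (fun m : Nat => (m : Int))) i
          = ((jn.choose i * pvF r (jn - i) : Nat) : Int) := by
        intro i hi
        have hij : i ≤ jn := by
          have := List.mem_range.mp hi
          omega
        have hsub : ((jn : Nat) : Int) - (i : Nat) = ((jn - i : Nat) : Int) := by
          push_cast [Nat.cast_sub hij]
          ring
        simp only [Function.comp_apply]
        rw [pv_comb_eq jn i hij, hsub, PySem.List.pyGetD_natCast,
          PySem.List.getD_map_range _ _ _ _ (by omega)]
        push_cast
        ring
      rw [List.map_congr_left hterm, pv_cast_sum]
      rfl
    rw [hstep, ih (x :: r)]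
    congr 1
    rw [List.reverse_cons, List.append_assoc]
    rfl

theorem pv_B_eq (w : String) (k : Int) (hk : 0 ≤ k)
    (hkn : k ≤ (w.toList.length : Int)) :
    count_distinct_words_alt w k = (pvF ((pvItems w.toList).reverse) k.toNat : Int) := by
  unfold count_distinct_words_alt
  rw [if_neg (by omega)]
  have hvals : (PySem.Dict.counter w.toList).values
      = (pvItems w.toList).map (fun p => (p.2 : Int)) := by
    simp only [PySem.Dict.values, PySem.Dict.items_counter, pvItems, List.map_map]
    rfl
  simp only [hvals, List.foldl_map]
  have hdp0 : (1 : Int) :: List.replicate k.toNat (0 : Int)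
      = (List.range (k.toNat + 1)).map (fun j => (pvF ([] : List (Char × Nat)) j : Int)) := by
    rw [List.range_succ_eq_map, List.map_cons, List.map_map]
    have hz : ∀ j ∈ List.range k.toNat,
        ((fun j => (pvF ([] : List (Char × Nat)) j : Int)) ∘ Nat.succ) j = 0 := fun j _ => rfl
    rw [List.map_congr_left hz]
    simp [List.map_const', pvF]
  rw [show (k : Int) + 1 = ((k.toNat : Nat) : Int) + 1 by rw [Int.toNat_of_nonneg hk], hdp0,
    pv_dp_fold k.toNat (pvItems w.toList) [], List.append_nil]
  rw [show k = ((k.toNat : Nat) : Int) from (Int.toNat_of_nonneg hk).symm]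
  simp only [Int.toNat_natCast]
  rw [PySem.List.pyGetD_natCast, PySem.List.getD_map_range _ _ _ _ (by omega)]

-- ===== VERDICT (by name: the statement is the Claim_ definition above) =====
theorem count_distinct_words_spec : Claim_equal_count_distinct_words := by
  intro w k _
  unfold Spec_count_distinct_words
  have hA : count_distinct_words w k
      = ((pvEnumA k (w.toList.length + 1) [] (PySem.Dict.counter w.toList)
          PySem.Set.empty).length : Int) := rfl
  by_cases hk : k < 0
  · rw [hA, pv_A_neg w.toList k hk]
    unfold count_distinct_words_alt
    rw [if_pos (Or.inl hk)]
    rfl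
  · push_neg at hk
    rw [hA, pv_A_eq w.toList k hk]
    by_cases hkn : (w.toList.length : Int) < k
    · rw [pvF_zero_of_lt _ _ (by rw [pv_items_sum]; omega)]
      unfold count_distinct_words_alt
      rw [if_pos (Or.inr hkn)]
      rfl
    · push_neg at hkn
      rw [pv_B_eq w k hk hkn]
      congr 1
      rw [← pv_words_len k.toNat _ (pv_items_keys_nodup w.toList),
        ← pv_words_len k.toNat _ (pv_items_rev_keys_nodup w.toList)]
      apply pv_len_congr k.toNat _ _ (pv_items_keys_nodup w.toList)
        (pv_items_rev_keys_nodup w.toList)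
      intro c
      rw [pv_lk_items, pv_lk_items_rev]
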